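-- pv_equiv track=rewrite | github.com/Tejas07PSK/lb_dsa_cracker | Matrix/Find median in a row wise sorted matrix/solution.py | __getNoOfElesLtTarget
-- ===== SOURCE A (Python) =====
-- def __getNoOfElesLtTarget (matrix, row, c, target):
--     l, r = 0, (c - 1)
--     while (l <= r):
--         mid = l + ((r - l) // 2)
--         if (matrix[row][mid] > target):
--             r = mid - 1
--         else:
--             l = mid + 1
--     return l
-- ===== SOURCE B (Python) =====
-- def __getNoOfElesLtTarget(matrix, row, c, target):
--     count = 0
--     for i in range(c):
--         if matrix[row][i] <= target:
--             count += 1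
--     return count
-- ===== Notes on version B (the rewrite author's own statement) =====
-- stated objective: simpler
-- what changed: Replaces the hand-rolled binary search for the insertion point with a direct linear count of the elements among the first c that are <= target.
-- outside the precondition, e.g. on __getNoOfElesLtTarget([[2, 1]], 0, 2, 1): A returns 0, B returns 1; on __getNoOfElesLtTarget([[5, 6]], 0, 3, 0): A returns 0, B raises IndexError
import Mathlib
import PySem

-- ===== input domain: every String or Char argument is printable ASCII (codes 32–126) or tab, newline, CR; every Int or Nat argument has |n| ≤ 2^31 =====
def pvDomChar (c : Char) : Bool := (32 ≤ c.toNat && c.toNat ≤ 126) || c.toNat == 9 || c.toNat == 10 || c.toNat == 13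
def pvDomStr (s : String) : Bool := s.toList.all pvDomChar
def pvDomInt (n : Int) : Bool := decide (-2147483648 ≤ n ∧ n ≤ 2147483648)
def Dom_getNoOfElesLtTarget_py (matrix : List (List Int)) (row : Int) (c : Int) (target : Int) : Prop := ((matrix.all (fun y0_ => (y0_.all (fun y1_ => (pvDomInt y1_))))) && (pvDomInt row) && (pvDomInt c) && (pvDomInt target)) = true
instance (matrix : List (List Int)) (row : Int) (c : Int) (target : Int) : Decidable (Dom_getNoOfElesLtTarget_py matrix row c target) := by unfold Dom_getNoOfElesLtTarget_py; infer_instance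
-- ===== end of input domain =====

-- B replaces A's binary search with a direct linear count (simpler, not faster);
-- equal wherever the probed prefix matrix[row][:c] exists and is sorted (Pre_ below).

-- ===== PORT A =====
-- while (l <= r): mid = l + (r-l)//2; branch on matrix[row][mid] > target.
-- none = IndexError (excluded by Pre_).
def pvLoopA (matrix : List (List Int)) (row target : Int) (l r : Int) : Option Int :=
  if l ≤ r then
    let mid := l + PySem.Int.floordiv (r - l) 2
    match PySem.List.pyGet? matrix row with
    | none => none
    | some rw =>
      match PySem.List.pyGet? rw mid with
      | none => none
      | some v =>
        if v > target then pvLoopA matrix row target l (mid - 1)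
        else pvLoopA matrix row target (mid + 1) r
  else some l
termination_by (r + 1 - l).toNat
decreasing_by
  · have h2 : PySem.Int.floordiv (r - l) 2 = (r - l) / 2 :=
      PySem.Int.floordiv_eq_ediv_of_pos (by omega)
    simp only [h2]; omega
  · have h2 : PySem.Int.floordiv (r - l) 2 = (r - l) / 2 :=
      PySem.Int.floordiv_eq_ediv_of_pos (by omega)
    simp only [h2]; omega

def getNoOfElesLtTarget_py (matrix : List (List Int)) (row : Int) (c : Int) (target : Int) : Int :=
  (pvLoopA matrix row target 0 (c - 1)).getD 0

-- ===== PORT B =====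
-- count = 0; for i in range(c): if matrix[row][i] <= target: count += 1
-- (indexing made total with defaults; Pre_ keeps every access in range)
def getNoOfElesLtTarget_py_alt (matrix : List (List Int)) (row : Int) (c : Int) (target : Int) : Int :=
  (PySem.List.pyRange 0 c 1).foldl
    (fun count i =>
      if PySem.List.pyGetD ((PySem.List.pyGet? matrix row).getD []) i 0 ≤ target then count + 1
      else count) 0

-- ===== PRECONDITION & SPEC =====
-- Pre_ excludes inputs where either program raises IndexError (row missing, or the scan/search
-- leaving index range), and unsorted prefixes matrix[row][:c], on which A's binary-search value is
-- an accident of its probe sequence and neither value is specified.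
def Pre_getNoOfElesLtTarget_py (matrix : List (List Int)) (row : Int) (c : Int) (target : Int) : Prop :=
  c ≤ 0 ∨ (PySem.List.pyGet? matrix row ≠ none ∧
    c ≤ (((PySem.List.pyGet? matrix row).getD []).length : Int) ∧
    (((PySem.List.pyGet? matrix row).getD []).take c.toNat).Pairwise (· ≤ ·))
instance (matrix : List (List Int)) (row : Int) (c : Int) (target : Int) : Decidable (Pre_getNoOfElesLtTarget_py matrix row c target) := by unfold Pre_getNoOfElesLtTarget_py; infer_instance

def pvWitness_getNoOfElesLtTarget_py : List (List Int) × Int × Int × Int := ([[1, 2, 3]], 0, 3, 2)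

def Spec_getNoOfElesLtTarget_py (matrix : List (List Int)) (row : Int) (c : Int) (target : Int) (out : Int) : Prop := out = getNoOfElesLtTarget_py_alt matrix row c target
instance (matrix : List (List Int)) (row : Int) (c : Int) (target : Int) (out : Int) : Decidable (Spec_getNoOfElesLtTarget_py matrix row c target out) := by unfold Spec_getNoOfElesLtTarget_py; infer_instance

-- ===== CLAIM (what is proved, stated in full; the proofs are below) =====
def Claim_equal_getNoOfElesLtTarget_py : Prop := ∀ (matrix : List (List Int)) (row : Int) (c : Int) (target : Int), Dom_getNoOfElesLtTarget_py matrix row c target → Pre_getNoOfElesLtTarget_py matrix row c target → Spec_getNoOfElesLtTarget_py matrix row c target (getNoOfElesLtTarget_py matrix row c target)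

-- ===== LEMMAS AND PROOFS =====

-- A's loop invariant: if everything left of l is ≤ target and everything right of r (below c)
-- is > target, the loop returns some L that is exactly the threshold position.
theorem pvLoopA_inv (matrix : List (List Int)) (row target : Int) (rw : List Int)
    (hget : PySem.List.pyGet? matrix row = some rw) (c : Int) (hc : c ≤ (rw.length : Int))
    (hmono : ∀ i j : Nat, i ≤ j → (j : Int) < c → rw.getD i 0 ≤ rw.getD j 0) :
    ∀ n : Nat, ∀ l r : Int, (r + 1 - l).toNat = n → 0 ≤ l → l ≤ r + 1 → r + 1 ≤ c →
    (∀ i : Nat, (i : Int) < l → rw.getD i 0 ≤ target) →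
    (∀ i : Nat, r < (i : Int) → (i : Int) < c → target < rw.getD i 0) →
    ∃ L, pvLoopA matrix row target l r = some L ∧ 0 ≤ L ∧ L ≤ c ∧
      (∀ i : Nat, (i : Int) < L → rw.getD i 0 ≤ target) ∧
      (∀ i : Nat, L ≤ (i : Int) → (i : Int) < c → target < rw.getD i 0) := by
  intro n
  induction n using Nat.strong_induction_on with
  | _ n ih =>
    intro l r hn hl0 hlr hrc hlo hhi
    rw [pvLoopA]
    by_cases hle : l ≤ r
    · simp only [hle, if_true]
      have h2 : PySem.Int.floordiv (r - l) 2 = (r - l) / 2 :=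
        PySem.Int.floordiv_eq_ediv_of_pos (by omega)
      set mid := l + PySem.Int.floordiv (r - l) 2 with hmid
      have hml : l ≤ mid := by omega
      have hmr : mid ≤ r := by omega
      have hmidlt : mid.toNat < rw.length := by omega
      have hvg : rw.getD mid.toNat 0 = rw[mid.toNat] := List.getD_eq_getElem rw 0 hmidlt
      have hv : PySem.List.pyGet? rw mid = some (rw.getD mid.toNat 0) := by
        rw [PySem.List.pyGet?_eq_some_getElem rw (by omega) (by omega), hvg]
      simp only [hget, hv]
      by_cases hgt : rw.getD mid.toNat 0 > target
      · simp only [hgt, if_true]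
        exact ih (mid - 1 + 1 - l).toNat (by omega) l (mid - 1) rfl hl0 (by omega) (by omega) hlo
          (fun i hi hic => by
            by_cases hir : r < (i : Int)
            · exact hhi i hir hic
            · have : rw.getD mid.toNat 0 ≤ rw.getD i 0 := hmono mid.toNat i (by omega) hic
              omega)
      · simp only [hgt, if_false]
        exact ih (r + 1 - (mid + 1)).toNat (by omega) (mid + 1) r rfl (by omega) (by omega) hrc
          (fun i hi => by
            by_cases hil : (i : Int) < l
            · exact hlo i hil
            · have : rw.getD i 0 ≤ rw.getD mid.toNat 0 := hmono i mid.toNat (by omega) (by omega)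
              omega)
          hhi
    · simp only [hle, if_false]
      exact ⟨l, rfl, hl0, by omega, hlo, fun i hi hic => hhi i (by omega) hic⟩

-- counting with a step g that adds one exactly below the threshold L
theorem foldl_count_below (g : Int → Int → Int) (c L : Int) (hLc : L ≤ c)
    (hg1 : ∀ a i : Int, 0 ≤ i → i < c → i < L → g a i = a + 1)
    (hg2 : ∀ a i : Int, 0 ≤ i → i < c → L ≤ i → g a i = a) :
    ∀ n : Nat, ∀ lo a : Int, (c - lo).toNat = n → 0 ≤ lo →
    (PySem.List.pyRange lo c 1).foldl g a = a + (min L c - lo) ⊔ 0 := by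
  intro n
  induction n using Nat.strong_induction_on with
  | _ n ih =>
    intro lo a hn hlo
    by_cases hlc : lo < c
    · rw [PySem.List.pyRange_one_cons hlc]
      simp only [List.foldl_cons]
      rw [ih (c - (lo + 1)).toNat (by omega) (lo + 1) (g a lo) rfl (by omega)]
      by_cases hpl : lo < L
      · rw [hg1 a lo hlo hlc hpl]; omega
      · rw [hg2 a lo hlo hlc (by omega)]; omega
    · rw [PySem.List.pyRange_one_eq_nil (by omega)]
      simp only [List.foldl_nil]; omega

-- ===== VERDICT (by name: the statement is the Claim_ definition above) =====
theorem getNoOfElesLtTarget_py_spec : Claim_equal_getNoOfElesLtTarget_py := by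
  intro matrix row c target _ hpre
  unfold Spec_getNoOfElesLtTarget_py getNoOfElesLtTarget_py getNoOfElesLtTarget_py_alt
  by_cases hc0 : c ≤ 0
  · rw [pvLoopA, if_neg (show ¬ (0 : Int) ≤ c - 1 by omega),
      PySem.List.pyRange_one_eq_nil (by omega)]
    rfl
  · rcases hpre with hc0' | ⟨hne, hc, hpair⟩
    · exact absurd hc0' hc0
    · obtain ⟨rw', hget⟩ := Option.ne_none_iff_exists'.mp hne
      rw [hget] at hc hpair ⊢
      simp only [Option.getD_some] at hc hpair ⊢
      have hmono : ∀ i j : Nat, i ≤ j → (j : Int) < c → rw'.getD i 0 ≤ rw'.getD j 0 := by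
        intro i j hij hjc
        have hjlen : j < rw'.length := by omega
        have hilen : i < rw'.length := by omega
        rcases Nat.lt_or_ge i j with hlt | hge
        · have hjt : j < (List.take c.toNat rw').length := by rw [List.length_take]; omega
          have hit : i < (List.take c.toNat rw').length := by rw [List.length_take]; omega
          have h := (List.pairwise_iff_getElem.mp hpair) i j hit hjt hlt
          simp only [List.getElem_take] at h
          rw [List.getD_eq_getElem rw' 0 hilen, List.getD_eq_getElem rw' 0 hjlen]
          exact h
        · have : i = j := by omega
          simp [this]
      obtain ⟨L, hL, hL0, hLc, hbelow, habove⟩ :=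
        pvLoopA_inv matrix row target rw' hget c hc hmono (c - 1 + 1 - 0).toNat 0 (c - 1) rfl
          le_rfl (by omega) (by omega)
          (fun i hi => absurd hi (by omega))
          (fun i h1 h2 => absurd (lt_of_lt_of_le h1 (by omega)) (lt_irrefl _))
      rw [hL]
      simp only [Option.getD_some]
      refine Eq.trans ?_ (Eq.symm (foldl_count_below _ c L hLc
        (fun a i h0 hic hiL => by
          have hilen : i < (rw'.length : Int) := by omega
          have heq : PySem.List.pyGetD rw' i 0 = rw'.getD i.toNat 0 := by
            rw [PySem.List.pyGetD_eq_getElem rw' 0 h0 hilen, List.getD_eq_getElem rw' 0 (by omega)]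
          simp only [heq]
          rw [if_pos (hbelow i.toNat (by omega))])
        (fun a i h0 hic hLi => by
          have hilen : i < (rw'.length : Int) := by omega
          have heq : PySem.List.pyGetD rw' i 0 = rw'.getD i.toNat 0 := by
            rw [PySem.List.pyGetD_eq_getElem rw' 0 h0 hilen, List.getD_eq_getElem rw' 0 (by omega)]
          simp only [heq]
          rw [if_neg (not_le.mpr (habove i.toNat (by omega) (by omega)))])
        (c - 0).toNat 0 0 rfl le_rfl))
      omega
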